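-- pv_equiv track=rewrite | github.com/ancue/algorithm | 数组.py | find
-- ===== SOURCE A (Python) =====
-- def find(array):
--     if not array:
--         return 0
--
--     '''
--     冒泡排序
--     '''
--     aList = [str(num) for num in array]
--     for i in range(len(aList) - 1):
--         for j in range(i + 1, len(aList)):
--             if aList[i] + aList[j] > aList[j] + aList[i]:
--                 aList[i], aList[j] = aList[j], aList[i]
--     return ''.join(aList)
-- ===== SOURCE B (Python) =====
-- def find(array):
--     if not array:
--         return 0
--
--     def merge(left, right):
--         res = []
--         i = j = 0
--         while i < len(left) and j < len(right):
--             if left[i] + right[j] <= right[j] + left[i]: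
--                 res.append(left[i])
--                 i += 1
--             else:
--                 res.append(right[j])
--                 j += 1
--         res.extend(left[i:])
--         res.extend(right[j:])
--         return res
--
--     def msort(lst):
--         if len(lst) <= 1:
--             return lst
--         mid = len(lst) // 2
--         return merge(msort(lst[:mid]), msort(lst[mid:]))
--
--     return ''.join(msort([str(num) for num in array]))
-- ===== Notes on version B (the rewrite author's own statement) =====
-- stated objective: faster
-- what changed: A's O(n^2) pairwise-swap (selection-style) sort under the 'a+b vs b+a' comparator is replaced by a hand-written stable merge sort with the same comparator, so the concatenation is built after O(n log n) comparisons.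
-- outside the precondition, e.g. on find([]): A returns 0, B returns 0
import Mathlib
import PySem

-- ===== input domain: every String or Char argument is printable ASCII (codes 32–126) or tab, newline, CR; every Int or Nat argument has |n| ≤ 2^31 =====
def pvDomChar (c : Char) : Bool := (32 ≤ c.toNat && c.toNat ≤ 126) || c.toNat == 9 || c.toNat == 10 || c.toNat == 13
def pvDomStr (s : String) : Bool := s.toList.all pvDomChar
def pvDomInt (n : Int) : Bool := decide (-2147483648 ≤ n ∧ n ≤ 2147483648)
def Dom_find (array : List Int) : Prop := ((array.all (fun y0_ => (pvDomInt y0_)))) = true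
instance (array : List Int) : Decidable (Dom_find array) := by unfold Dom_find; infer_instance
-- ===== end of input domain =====

-- B replaces A's O(n^2) pairwise-swap sort with an O(n log n) stable merge sort under the
-- same concatenation comparator; equality of the joined string is proved for every admitted input.
-- Python str values are carried as their code-point lists (PySem.Chars); Python's str `<` IS `<` on List Char.

-- ===== PORT A =====
-- inner loop 'for j in range(i+1, n): if aList[i]+aList[j] > aList[j]+aList[i]: swap' —
-- structural recursion over the same state (the current aList[i] and the suffix after position i):
def findSelect (c : List Char) (rest : List (List Char)) : List Char × List (List Char) :=
  match rest with
  | [] => (c, [])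
  | x :: xs =>
    if PySem.Chars.strLt (x ++ c) (c ++ x) then          -- aList[i] + aList[j] > aList[j] + aList[i]
      ((findSelect x xs).1, c :: (findSelect x xs).2)    -- swap: x becomes aList[i], c is left at position j
    else
      ((findSelect c xs).1, x :: (findSelect c xs).2)

theorem findSelect_length (c : List Char) (rest : List (List Char)) :
    (findSelect c rest).2.length = rest.length := by
  induction rest generalizing c with
  | nil => rfl
  | cons x xs ih => simp only [findSelect]; split <;> simp [ih]

-- outer loop 'for i in range(n-1)': position i is fixed to the selected element, recurse on the suffix
def findSort (l : List (List Char)) : List (List Char) :=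
  match l with
  | [] => []
  | c :: rest => (findSelect c rest).1 :: findSort (findSelect c rest).2
  termination_by l.length
  decreasing_by simp [findSelect_length]

-- 'if not array: return 0' returns an int, not a str: the empty list is outside Pre_find
def find (array : List Int) : String :=
  String.ofList (PySem.Chars.join [] (findSort (array.map PySem.Int.toChars)))

-- ===== PORT B =====
-- Source B's merge: while loop over the two front indices, i.e. structural recursion on the two suffixes
def findMerge (left right : List (List Char)) : List (List Char) :=
  match left, right with
  | [], r => r                                                 -- res.extend(right[j:])
  | x :: xs, [] => x :: findMerge xs []                        -- res.extend(left[i:])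
  | x :: xs, y :: ys =>
    if PySem.Chars.strLt (y ++ x) (x ++ y) = false then        -- left[i] + right[j] <= right[j] + left[i]
      x :: findMerge xs (y :: ys)
    else
      y :: findMerge (x :: xs) ys

-- Source B's msort; lst[:mid] / lst[mid:] with 0 ≤ mid ≤ len(lst) are exactly take/drop, len//2 on a Nat is Nat division
def findMsort (l : List (List Char)) : List (List Char) :=
  if l.length ≤ 1 then l
  else
    findMerge (findMsort (l.take (l.length / 2))) (findMsort (l.drop (l.length / 2)))
  termination_by l.length
  decreasing_by
  · simp only [List.length_take]; omega
  · simp only [List.length_drop]; omega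

def find_alt (array : List Int) : String :=
  String.ofList (PySem.Chars.join [] (findMsort (array.map PySem.Int.toChars)))

-- ===== PRECONDITION & SPEC =====
-- Pre_ excludes only the empty list: there Python A returns the int 0, not a str.
def Pre_find (array : List Int) : Prop := array ≠ []
instance (array : List Int) : Decidable (Pre_find array) := by unfold Pre_find; infer_instance
def pvWitness_find : List Int := [3, 30, 34, 5, 9]

def Spec_find (array : List Int) (out : String) : Prop := out = find_alt array
instance (array : List Int) (out : String) : Decidable (Spec_find array out) := by unfold Spec_find; infer_instance

-- ===== CLAIM (what is proved, stated in full; the proofs are below) =====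
def Claim_equal_find : Prop := ∀ (array : List Int), Dom_find array → Pre_find array → Spec_find array (find array)

-- ===== LEMMAS AND PROOFS =====

-- the comparator: x before y is fine iff x ++ y ≤ y ++ x (code-point order)
def pvLe (x y : List Char) : Prop := x ++ y ≤ y ++ x

-- numeric value of a string read as big-endian base-1114112 digits (1114112 > every code point)
def pvVal : List Char → ℕ
  | [] => 0
  | c :: s => c.toNat * 1114112 ^ s.length + pvVal s

theorem pvChar_lt (c : Char) : c.toNat < 1114112 := by
  have h := c.valid
  rcases h with h | ⟨h1, h2⟩ <;> unfold Char.toNat <;> omega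

theorem pvVal_lt (s : List Char) : pvVal s < 1114112 ^ s.length := by
  induction s with
  | nil => simp [pvVal]
  | cons c s ih =>
    have hc : c.toNat + 1 ≤ 1114112 := pvChar_lt c
    have hp : 0 < (1114112:ℕ) ^ s.length := pow_pos (by norm_num) _
    calc c.toNat * 1114112 ^ s.length + pvVal s
        < c.toNat * 1114112 ^ s.length + 1114112 ^ s.length := by omega
      _ = (c.toNat + 1) * 1114112 ^ s.length := by ring
      _ ≤ 1114112 * 1114112 ^ s.length := Nat.mul_le_mul_right _ hc
      _ = 1114112 ^ (c :: s).length := by rw [List.length_cons, pow_succ]; ring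

theorem pvVal_append (s t : List Char) :
    pvVal (s ++ t) = pvVal s * 1114112 ^ t.length + pvVal t := by
  induction s with
  | nil => simp [pvVal]
  | cons c s ih =>
    simp only [List.cons_append, pvVal, ih, List.length_append, pow_add]
    ring

-- lexicographic < agrees with numeric < on equal-length strings
theorem pvLt_val (x y : List Char) (h : x.length = y.length) (hlt : x < y) :
    pvVal x < pvVal y := by
  induction x generalizing y with
  | nil =>
    cases y with
    | nil => exact absurd hlt (List.not_lt_nil _)
    | cons d t => simp at h
  | cons c s ih =>
    cases y with
    | nil => simp at h
    | cons d t =>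
      have hlen : s.length = t.length := by simpa using h
      rcases List.cons_lt_cons_iff.mp hlt with hcd | ⟨rfl, hst⟩
      · have hcd' : c.toNat < d.toNat := hcd
        have h1 : pvVal s < 1114112 ^ s.length := pvVal_lt s
        have h2 : 0 ≤ pvVal t := Nat.zero_le _
        simp only [pvVal, hlen]
        have hp : 0 < (1114112:ℕ) ^ t.length := pow_pos (by norm_num) _
        have : (c.toNat + 1) * 1114112 ^ t.length ≤ d.toNat * 1114112 ^ t.length :=
          Nat.mul_le_mul_right _ hcd'
        have h1' : pvVal s < 1114112 ^ t.length := hlen ▸ h1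
        nlinarith
      · have := ih t hlen hst
        simp only [pvVal, hlen]
        omega

theorem pvLt_iff_val (x y : List Char) (h : x.length = y.length) :
    x < y ↔ pvVal x < pvVal y := by
  constructor
  · exact pvLt_val x y h
  · intro hv
    rcases lt_trichotomy x y with hxy | rfl | hyx
    · exact hxy
    · exact absurd hv (lt_irrefl _)
    · exact absurd (pvLt_val y x h.symm hyx) (by omega)

theorem pvLe_iff_val (x y : List Char) :
    pvLe x y ↔ pvVal x * 1114112 ^ y.length + pvVal y ≤ pvVal y * 1114112 ^ x.length + pvVal x := by
  have hlen : (x ++ y).length = (y ++ x).length := by simp [Nat.add_comm]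
  constructor
  · intro hle
    have : ¬ pvVal (y ++ x) < pvVal (x ++ y) := by
      intro hv
      have := (pvLt_iff_val (y ++ x) (x ++ y) hlen.symm).mpr hv
      exact absurd hle (not_le.mpr this)
    rw [pvVal_append, pvVal_append] at this
    omega
  · intro hv
    by_contra hlt
    have : y ++ x < x ++ y := not_le.mp hlt
    have := (pvLt_iff_val (y ++ x) (x ++ y) hlen.symm).mp this
    rw [pvVal_append, pvVal_append] at this
    omega

theorem pvLe_refl (x : List Char) : pvLe x x := le_refl _

theorem pvLe_of_strLt_false (x y : List Char) (h : PySem.Chars.strLt (y ++ x) (x ++ y) = false) :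
    pvLe x y := by
  simp only [PySem.Chars.strLt, decide_eq_false_iff_not] at h
  exact not_lt.mp h

theorem pvLe_of_strLt_true (x y : List Char) (h : PySem.Chars.strLt (x ++ y) (y ++ x) = true) :
    pvLe x y := by
  simp only [PySem.Chars.strLt, decide_eq_true_eq] at h
  exact le_of_lt h

theorem pvLe_trans (x y z : List Char) (hx : x ≠ []) (hy : y ≠ []) (hz : z ≠ [])
    (h1 : pvLe x y) (h2 : pvLe y z) : pvLe x z := by
  rw [pvLe_iff_val] at h1 h2 ⊢
  have hx1 : 1 ≤ x.length := List.length_pos_iff.mpr hx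
  have hy1 : 1 ≤ y.length := List.length_pos_iff.mpr hy
  have hz1 : 1 ≤ z.length := List.length_pos_iff.mpr hz
  have hp : 1114112 ≤ (1114112:ℕ) ^ x.length := le_trans (by norm_num) (Nat.pow_le_pow_right (by norm_num) hx1)
  have hq : 1114112 ≤ (1114112:ℕ) ^ y.length := le_trans (by norm_num) (Nat.pow_le_pow_right (by norm_num) hy1)
  have hr : 1114112 ≤ (1114112:ℕ) ^ z.length := le_trans (by norm_num) (Nat.pow_le_pow_right (by norm_num) hz1)
  set a := pvVal x with ha
  set b := pvVal y with hb
  set c := pvVal z with hc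
  set P := (1114112:ℕ) ^ x.length with hP
  set Q := (1114112:ℕ) ^ y.length with hQ
  set R := (1114112:ℕ) ^ z.length with hR
  zify at h1 h2 ⊢
  have key : (a:ℤ) * (R - 1) * (Q - 1) ≤ (c:ℤ) * (P - 1) * (Q - 1) := by nlinarith
  have hQ1 : (0:ℤ) < (Q:ℤ) - 1 := by
    have : (1114112:ℤ) ≤ Q := by exact_mod_cast hq
    omega
  have := le_of_mul_le_mul_right key hQ1
  nlinarith

-- A-side: the inner loop returns a permutation whose head is minimal
theorem findSelect_perm (c : List Char) (rest : List (List Char)) :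
    List.Perm ((findSelect c rest).1 :: (findSelect c rest).2) (c :: rest) := by
  induction rest generalizing c with
  | nil => simp [findSelect]
  | cons x xs ih =>
    simp only [findSelect]
    split
    · exact (List.Perm.swap c (findSelect x xs).1 _).trans ((ih x).cons c)
    · exact ((List.Perm.swap x (findSelect c xs).1 _).trans ((ih c).cons x)).trans (List.Perm.swap c x xs)

theorem findSelect_min (c : List Char) (rest : List (List Char))
    (hne : ∀ w ∈ c :: rest, w ≠ []) :
    ∀ w ∈ c :: rest, pvLe (findSelect c rest).1 w := by
  induction rest generalizing c with
  | nil =>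
    intro w hw
    rcases List.mem_singleton.mp hw with rfl
    simpa [findSelect] using pvLe_refl w
  | cons x xs ih =>
    have hc : c ≠ [] := hne c (by simp)
    have hx : x ≠ [] := hne x (by simp)
    have hxs : ∀ w ∈ x :: xs, w ≠ [] := fun w hw => hne w (by simp at hw ⊢; tauto)
    have hcs : ∀ w ∈ c :: xs, w ≠ [] := fun w hw => hne w (by simp at hw ⊢; tauto)
    intro w hw
    simp only [findSelect]
    split
    · rename_i hswap
      have hxc : pvLe x c := pvLe_of_strLt_true x c hswap
      have hmin := ih x hxs
      have hm_mem : (findSelect x xs).1 ∈ x :: xs :=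
        (findSelect_perm x xs).mem_iff.mp (by simp)
      have hmne : (findSelect x xs).1 ≠ [] := hxs _ hm_mem
      rcases hw with _ | ⟨_, hw⟩
      · exact pvLe_trans _ x c hmne hx hc (hmin x (by simp)) hxc
      · rcases hw with _ | ⟨_, hw⟩
        · exact hmin x (by simp)
        · exact hmin _ (by simp [List.mem_cons.mpr (Or.inr hw)])
    · rename_i hns
      have hcx : pvLe c x := pvLe_of_strLt_false c x (by simpa using hns)
      have hmin := ih c hcs
      have hm_mem : (findSelect c xs).1 ∈ c :: xs :=
        (findSelect_perm c xs).mem_iff.mp (by simp)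
      have hmne : (findSelect c xs).1 ≠ [] := hcs _ hm_mem
      rcases hw with _ | ⟨_, hw⟩
      · exact hmin c (by simp)
      · rcases hw with _ | ⟨_, hw⟩
        · exact pvLe_trans _ c x hmne hc hx (hmin c (by simp)) hcx
        · exact hmin _ (by simp [List.mem_cons.mpr (Or.inr hw)])

theorem findSort_perm (l : List (List Char)) : List.Perm (findSort l) l := by
  fun_induction findSort with
  | case1 => rfl
  | case2 c rest ih =>
    exact (ih.cons _).trans (findSelect_perm c rest)

theorem findSort_sorted (l : List (List Char)) (hne : ∀ w ∈ l, w ≠ []) :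
    List.Pairwise pvLe (findSort l) := by
  fun_induction findSort with
  | case1 => simp
  | case2 c rest ih =>
    have hperm := findSelect_perm c rest
    have hne2 : ∀ w ∈ (findSelect c rest).2, w ≠ [] := by
      intro w hw
      exact hne w (hperm.mem_iff.mp (by simp [hw]))
    refine List.pairwise_cons.mpr ⟨?_, ih hne2⟩
    intro z hz
    have hz' : z ∈ c :: rest := hperm.mem_iff.mp (by
      simp [List.mem_cons, (findSort_perm _).mem_iff.mp hz])
    exact findSelect_min c rest hne z hz'

-- B-side: merge sort is a sorted permutation too
theorem findMerge_perm (l r : List (List Char)) : List.Perm (findMerge l r) (l ++ r) := by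
  fun_induction findMerge with
  | case1 r => simp
  | case2 x xs ih => simpa using ih.cons x
  | case3 x xs y ys h ih => exact ih.cons x
  | case4 x xs y ys h ih => exact (ih.cons y).trans List.perm_middle.symm

theorem findMerge_sorted (l r : List (List Char)) (hne : ∀ w ∈ l ++ r, w ≠ [])
    (hl : List.Pairwise pvLe l) (hr : List.Pairwise pvLe r) :
    List.Pairwise pvLe (findMerge l r) := by
  fun_induction findMerge with
  | case1 r => exact hr
  | case2 x xs ih =>
    rcases List.pairwise_cons.mp hl with ⟨hx, hxs⟩
    refine List.pairwise_cons.mpr ⟨?_, ih (by simpa using fun w hw => hne w (by simp [hw])) hxs hr⟩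
    intro z hz
    exact hx z (by simpa using (findMerge_perm xs []).mem_iff.mp hz)
  | case3 x xs y ys h ih =>
    rcases List.pairwise_cons.mp hl with ⟨hx, hxs⟩
    have hxy : pvLe x y := pvLe_of_strLt_false x y h
    have hne' : ∀ w ∈ xs ++ y :: ys, w ≠ [] := fun w hw => hne w (by simp at hw ⊢; tauto)
    refine List.pairwise_cons.mpr ⟨?_, ih hne' hxs hr⟩
    intro z hz
    have hz' : z ∈ xs ++ y :: ys := (findMerge_perm _ _).mem_iff.mp hz
    rcases List.mem_append.mp hz' with hzl | hzr
    · exact hx z hzl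
    · rcases List.mem_cons.mp hzr with rfl | hzys
      · exact hxy
      · have hyz : pvLe y z := (List.pairwise_cons.mp hr).1 z hzys
        have hxne : x ≠ [] := hne x (by simp)
        have hyne : y ≠ [] := hne y (by simp)
        have hzne : z ≠ [] := hne' z hz'
        exact pvLe_trans x y z hxne hyne hzne hxy hyz
  | case4 x xs y ys h ih =>
    rcases List.pairwise_cons.mp hr with ⟨hy, hys⟩
    have hyx : pvLe y x := pvLe_of_strLt_true y x (by simpa using h)
    have hne' : ∀ w ∈ (x :: xs) ++ ys, w ≠ [] := fun w hw => hne w (by simp at hw ⊢; tauto)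
    refine List.pairwise_cons.mpr ⟨?_, ih hne' hl hys⟩
    intro z hz
    have hz' : z ∈ (x :: xs) ++ ys := (findMerge_perm _ _).mem_iff.mp hz
    have hyne : y ≠ [] := hne y (by simp)
    rcases List.mem_append.mp hz' with hzl | hzr
    · rcases List.mem_cons.mp hzl with rfl | hzxs
      · exact hyx
      · have hxz : pvLe x z := (List.pairwise_cons.mp hl).1 z hzxs
        have hxne : x ≠ [] := hne x (by simp)
        have hzne : z ≠ [] := hne' z hz'
        exact pvLe_trans y x z hyne hxne hzne hyx hxz
    · exact hy z hzr

theorem findMsort_perm (l : List (List Char)) : List.Perm (findMsort l) l := by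
  fun_induction findMsort with
  | case1 l h => rfl
  | case2 l h ih1 ih2 =>
    exact ((findMerge_perm _ _).trans (ih1.append ih2)).trans (by rw [List.take_append_drop])

theorem findMsort_sorted (l : List (List Char)) (hne : ∀ w ∈ l, w ≠ []) :
    List.Pairwise pvLe (findMsort l) := by
  fun_induction findMsort with
  | case1 l h =>
    match l, h with
    | [], _ => simp
    | [x], _ => simp
  | case2 l h ih1 ih2 =>
    have hne1 : ∀ w ∈ l.take (l.length / 2), w ≠ [] := fun w hw => hne w (List.mem_of_mem_take hw)
    have hne2 : ∀ w ∈ l.drop (l.length / 2), w ≠ [] := fun w hw => hne w (List.mem_of_mem_drop hw)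
    refine findMerge_sorted _ _ ?_ (ih1 hne1) (ih2 hne2)
    intro w hw
    rcases List.mem_append.mp hw with hw | hw
    · exact hne1 w ((findMsort_perm _).mem_iff.mp hw)
    · exact hne2 w ((findMsort_perm _).mem_iff.mp hw)

-- joins of two sorted permutations coincide: tied elements commute under ++ (antisymmetry of ≤)
theorem pvFlatten_min_erase (l : List (List Char)) (x : List Char)
    (hs : List.Pairwise pvLe l) (hm : x ∈ l) (hmin : ∀ y ∈ l, pvLe x y) :
    l.flatten = x ++ (l.erase x).flatten := by
  induction l with
  | nil => simp at hm
  | cons h t ih =>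
    by_cases hhx : h = x
    · subst hhx
      rw [List.erase_cons_head]
      simp
    · have hxt : x ∈ t := by
        rcases List.mem_cons.mp hm with rfl | hxt
        · exact absurd rfl hhx
        · exact hxt
      rcases List.pairwise_cons.mp hs with ⟨hhead, htail⟩
      have hcomm : h ++ x = x ++ h :=
        le_antisymm (hhead x hxt) (hmin h (by simp))
      rw [List.erase_cons_tail (by simpa using hhx)]
      have := ih htail hxt (fun y hy => hmin y (by simp [hy]))
      calc (h :: t).flatten = h ++ t.flatten := by simp
        _ = h ++ (x ++ (t.erase x).flatten) := by rw [this]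
        _ = (h ++ x) ++ (t.erase x).flatten := by rw [List.append_assoc]
        _ = (x ++ h) ++ (t.erase x).flatten := by rw [hcomm]
        _ = x ++ (h :: (t.erase x)).flatten := by simp


theorem pvFlatten_eq (l₁ l₂ : List (List Char)) (hp : List.Perm l₁ l₂)
    (h₁ : List.Pairwise pvLe l₁) (h₂ : List.Pairwise pvLe l₂) :
    l₁.flatten = l₂.flatten := by
  induction l₁ generalizing l₂ with
  | nil =>
    rw [hp.nil_eq.symm]
  | cons a t₁ ih =>
    have ha : a ∈ l₂ := hp.mem_iff.mp (by simp)
    have hmin : ∀ y ∈ l₂, pvLe a y := by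
      intro y hy
      rcases List.mem_cons.mp (hp.mem_iff.mpr hy) with rfl | hyt
      · exact pvLe_refl _
      · exact (List.pairwise_cons.mp h₁).1 y hyt
    rw [pvFlatten_min_erase l₂ a h₂ ha hmin]
    have hperm : List.Perm t₁ (l₂.erase a) := by
      have := hp.erase a
      rwa [List.erase_cons_head] at this
    have h₂' : List.Pairwise pvLe (l₂.erase a) :=
      h₂.sublist (List.erase_sublist ..)
    rw [List.flatten_cons, ih (l₂.erase a) hperm (List.pairwise_cons.mp h₁).2 h₂']

theorem pvJoin_nil (l : List (List Char)) : PySem.Chars.join [] l = l.flatten := by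
  induction l with
  | nil => simp [PySem.Chars.join_nil]
  | cons p t ih =>
    cases t with
    | nil => simp [PySem.Chars.join_singleton]
    | cons q r => rw [PySem.Chars.join_cons_cons, ih]; simp

theorem pvToChars_ne_nil (n : Int) : PySem.Int.toChars n ≠ [] := by
  unfold PySem.Int.toChars
  split
  · simp
  · exact List.ne_nil_of_length_pos Nat.length_toDigits_pos

-- ===== VERDICT (by name: the statement is the Claim_ definition above) =====
theorem find_spec : Claim_equal_find := by
  intro array _ _
  unfold Spec_find find find_alt
  have hne : ∀ w ∈ array.map PySem.Int.toChars, w ≠ [] := by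
    intro w hw
    rcases List.mem_map.mp hw with ⟨n, _, rfl⟩
    exact pvToChars_ne_nil n
  rw [pvJoin_nil, pvJoin_nil]
  exact congrArg String.ofList
    (pvFlatten_eq _ _ ((findSort_perm _).trans (findMsort_perm _).symm)
      (findSort_sorted _ hne) (findMsort_sorted _ hne))
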